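-- pv_equiv track=rewrite | github.com/JarrettB42/park-area-3 | code practice.py | is_complete_cycle_counting
-- ===== SOURCE A (Python) =====
-- def next_relative_index(index, array):
--     return (index + array[index]) % len(array) # wrap around left/right
--
-- def is_complete_cycle_counting(array):
--     #TODO: validate array?
--     current_index = 0
--     for i in range(len(array)-1):  # jump N-1 times
--         current_index = next_relative_index(current_index, array) # make the jump
--         if current_index == 0: # if we see 0 before the end
--             return False       # the cycle was too short
--     current_index = next_relative_index(current_index, array) # make the last jump
--     # if we made it back to index 0 after N total jumps, it's 1 full cycle
--     return current_index == 0
-- ===== SOURCE B (Python) =====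
-- def is_complete_cycle_counting(array):
--     # Walk from index 0 adding each index to a visited set; stop at the first
--     # revisit.  The jumps form one full N-cycle iff we visited all N indices
--     # and the first revisited index is 0.
--     idx = 0
--     visited = set()
--     while idx not in visited:
--         visited.add(idx)
--         idx = (idx + array[idx]) % len(array)
--     return len(visited) == len(array) and idx == 0
-- ===== Notes on version B (the rewrite author's own statement) =====
-- stated objective: alternative
-- what changed: A makes exactly N jumps with a fixed-count loop whose only early exit is revisiting index 0; B instead walks with a visited set until the first revisit of ANY index and returns whether the walk covered all N indices and the first revisited index is 0.
-- outside the precondition, e.g. on is_complete_cycle_counting([]): A raises IndexError, B raises IndexError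
import Mathlib
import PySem

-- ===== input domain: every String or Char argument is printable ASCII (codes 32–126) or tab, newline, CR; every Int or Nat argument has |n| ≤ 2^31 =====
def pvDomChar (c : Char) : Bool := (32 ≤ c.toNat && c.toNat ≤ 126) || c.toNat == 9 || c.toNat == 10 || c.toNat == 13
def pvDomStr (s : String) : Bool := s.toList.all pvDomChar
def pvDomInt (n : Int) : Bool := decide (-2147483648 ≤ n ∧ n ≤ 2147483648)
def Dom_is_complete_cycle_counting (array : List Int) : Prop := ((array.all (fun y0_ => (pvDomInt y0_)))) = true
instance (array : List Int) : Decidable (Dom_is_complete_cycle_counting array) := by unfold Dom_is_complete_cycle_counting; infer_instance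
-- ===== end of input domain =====

-- B replaces A's fixed count of N jumps (with an early-exit scan) by a visited-set walk
-- stopped at the first revisited index ("one simple cycle covering all indices"); same
-- O(n) cost, alternative algorithm.

-- ===== PORT A =====
-- next_relative_index(index, array): array[index] raises IndexError out of range; under
-- Pre_ (array ≠ []) every index fed to it lies in [0, len), so the getD 0 default is never used.
def pvStep (array : List Int) (index : Int) : Int :=
  PySem.Int.mod (index + (PySem.List.pyGet? array index).getD 0) (array.length : Int)

def is_complete_cycle_counting (array : List Int) : Bool :=
  -- state: none = early 'return False', some ci = current_index
  match (List.range (array.length - 1)).foldl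
      (fun (st : Option Int) (_ : Nat) =>
        match st with
        | none => none
        | some ci =>
          let ci' := pvStep array ci
          if ci' = 0 then none else some ci') (some 0) with
  | none => false
  | some ci => decide (pvStep array ci = 0)

-- ===== PORT B =====
-- the while-loop of Source B; fuel array.length + 1 suffices: the loop adds a fresh index of
-- [0, len) to the set each iteration, so it revisits within len(array)+1 checks.
def pvWalk (array : List Int) : Nat → Int → PySem.Set Int → Int × PySem.Set Int
  | 0, idx, vis => (idx, vis)
  | fuel+1, idx, vis =>
    if PySem.Set.contains vis idx then (idx, vis)
    else pvWalk array fuel (pvStep array idx) (PySem.Set.add vis idx)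

def is_complete_cycle_counting_alt (array : List Int) : Bool :=
  let r := pvWalk array (array.length + 1) 0 PySem.Set.empty
  decide (PySem.Set.len r.2 = (array.length : Int)) && decide (r.1 = 0)

-- ===== PRECONDITION & SPEC =====
-- Pre_ excludes only the empty list, on which both Pythons raise IndexError (array[0]).
def Pre_is_complete_cycle_counting (array : List Int) : Prop := array ≠ []
instance (array : List Int) : Decidable (Pre_is_complete_cycle_counting array) := by
  unfold Pre_is_complete_cycle_counting; infer_instance

def pvWitness_is_complete_cycle_counting : List Int := [1, 1]

def Spec_is_complete_cycle_counting (array : List Int) (out : Bool) : Prop := out = is_complete_cycle_counting_alt array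
instance (array : List Int) (out : Bool) : Decidable (Spec_is_complete_cycle_counting array out) := by unfold Spec_is_complete_cycle_counting; infer_instance

-- ===== CLAIM (what is proved, stated in full; the proofs are below) =====
def Claim_equal_is_complete_cycle_counting : Prop := ∀ (array : List Int), Dom_is_complete_cycle_counting array → Pre_is_complete_cycle_counting array → Spec_is_complete_cycle_counting array (is_complete_cycle_counting array)

-- ===== LEMMAS AND PROOFS =====

-- the jump trajectory: pvTraj k = index after k jumps from 0
def pvTraj (array : List Int) : Nat → Int
  | 0 => 0
  | k+1 => pvStep array (pvTraj array k)

-- the indices visited before step t, in order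
def pvVis (array : List Int) (t : Nat) : List Int := (List.range t).map (pvTraj array)

lemma pvTraj_bounds (array : List Int) (h : array ≠ []) (k : Nat) :
    0 ≤ pvTraj array k ∧ pvTraj array k < (array.length : Int) := by
  have hn : (0:Int) < (array.length : Int) := by
    have := List.length_pos_iff.mpr h; exact_mod_cast this
  cases k with
  | zero => exact ⟨le_refl 0, hn⟩
  | succ k =>
    exact ⟨PySem.Int.mod_nonneg _ hn, PySem.Int.mod_lt _ hn⟩

lemma pvTraj_shift (array : List Int) {i j : Nat} (h : pvTraj array i = pvTraj array j) :
    ∀ k, pvTraj array (i + k) = pvTraj array (j + k) := by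
  intro k
  induction k with
  | zero => simpa using h
  | succ k ih =>
    show pvStep array (pvTraj array (i + k)) = pvStep array (pvTraj array (j + k))
    rw [ih]

lemma pvVis_mem (array : List Int) (t : Nat) (x : Int) :
    x ∈ pvVis array t ↔ ∃ i, i < t ∧ pvTraj array i = x := by
  simp [pvVis, List.mem_map, List.mem_range]

lemma pvVis_nodup_of (array : List Int) (t : Nat)
    (h : ∀ i j, i < j → j < t → pvTraj array i ≠ pvTraj array j) :
    (pvVis array t).Nodup := by
  refine List.Nodup.map_on ?_ (List.nodup_range)
  intro i hi j hj hij
  simp only [List.mem_range] at hi hj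
  by_contra hne
  rcases Nat.lt_or_ge i j with hlt | hge
  · exact h i j hlt hj hij
  · rcases Nat.lt_or_ge j i with hlt' | hge'
    · exact h j i hlt' hi hij.symm
    · exact hne (Nat.le_antisymm hge' hge)

-- existence of a repeat within n steps (pigeonhole)
lemma pvRepeat_exists (array : List Int) (h : array ≠ []) :
    ∃ t, t ≤ array.length ∧ pvTraj array t ∈ pvVis array t := by
  by_contra hc
  push Not at hc
  set n := array.length with hn
  have hnd : (pvVis array (n+1)).Nodup := by
    apply pvVis_nodup_of
    intro i j hij hj hEq
    have hj' : j ≤ n := Nat.lt_succ_iff.mp hj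
    exact hc j hj' ((pvVis_mem array j _).mpr ⟨i, hij, hEq⟩)
  -- map to Nat; a nodup list of n+1 naturals all < n is impossible
  have hmapnd : ((pvVis array (n+1)).map Int.toNat).Nodup := by
    refine hnd.map_on ?_
    intro a ha b hb hab
    rcases (pvVis_mem array _ a).mp ha with ⟨i, _, hi⟩
    rcases (pvVis_mem array _ b).mp hb with ⟨j, _, hj⟩
    have ha0 : 0 ≤ a := hi ▸ (pvTraj_bounds array h i).1
    have hb0 : 0 ≤ b := hj ▸ (pvTraj_bounds array h j).1
    omega
  have hsub : ((pvVis array (n+1)).map Int.toNat).toFinset ⊆ Finset.range n := by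
    intro m hm
    simp only [List.mem_toFinset, List.mem_map] at hm
    rcases hm with ⟨a, ha, rfl⟩
    rcases (pvVis_mem array _ a).mp ha with ⟨i, _, hi⟩
    have hb := pvTraj_bounds array h i
    rw [hi] at hb
    simp only [Finset.mem_range]
    omega
  have hcard : ((pvVis array (n+1)).map Int.toNat).toFinset.card = n + 1 := by
    rw [List.toFinset_card_of_nodup hmapnd]
    simp [pvVis]
  have := Finset.card_le_card hsub
  simp [hcard] at this

lemma pvRepeat_exists' (array : List Int) (h : array ≠ []) :
    ∃ t, pvTraj array t ∈ pvVis array t := by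
  rcases pvRepeat_exists array h with ⟨t, _, ht⟩; exact ⟨t, ht⟩

-- the first repeat time
def pvT (array : List Int) (h : array ≠ []) : Nat :=
  Nat.find (pvRepeat_exists' array h)

lemma pvT_spec (array : List Int) (h : array ≠ []) :
    pvTraj array (pvT array h) ∈ pvVis array (pvT array h) :=
  Nat.find_spec (pvRepeat_exists' array h)

lemma pvT_min (array : List Int) (h : array ≠ []) {t : Nat} (ht : t < pvT array h) :
    pvTraj array t ∉ pvVis array t :=
  Nat.find_min (pvRepeat_exists' array h) ht

lemma pvT_le (array : List Int) (h : array ≠ []) : pvT array h ≤ array.length := by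
  rcases pvRepeat_exists array h with ⟨t, htn, ht⟩
  exact le_trans (Nat.find_min' (pvRepeat_exists' array h) ht) htn

-- the walk stops exactly at the first repeat
lemma pvWalk_stop (array : List Int) (h : array ≠ []) :
    ∀ fuel t, t ≤ pvT array h → pvT array h ≤ t + fuel →
    pvWalk array fuel (pvTraj array t) (pvVis array t) =
      (pvTraj array (pvT array h), pvVis array (pvT array h)) := by
  intro fuel
  induction fuel with
  | zero =>
    intro t h1 h2
    have : t = pvT array h := le_antisymm h1 (by omega)
    subst this; rfl
  | succ fuel ih =>
    intro t h1 h2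
    rcases Nat.lt_or_ge t (pvT array h) with hlt | hge
    · -- no repeat yet: contains is false, add appends traj t
      have hnot : pvTraj array t ∉ pvVis array t := pvT_min array h hlt
      have hc : PySem.Set.contains (pvVis array t) (pvTraj array t) = false := by
        simp [PySem.Set.contains]
        intro hmem; exact absurd hmem hnot
      have hadd : PySem.Set.add (pvVis array t) (pvTraj array t) = pvVis array (t+1) := by
        simp only [PySem.Set.add, hc]
        simp [pvVis, List.range_succ]
      simp only [pvWalk, hc]
      simp only [Bool.false_eq_true, if_false, hadd]
      have : pvStep array (pvTraj array t) = pvTraj array (t+1) := rfl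
      rw [this]
      exact ih (t+1) hlt (by omega)
    · -- t = pvT: contains is true, return
      have : t = pvT array h := le_antisymm h1 hge
      subst this
      have hc : PySem.Set.contains (pvVis array (pvT array h)) (pvTraj array (pvT array h)) = true := by
        simp [PySem.Set.contains]
        exact pvT_spec array h
      simp only [pvWalk, hc, if_true]

lemma pvAlt_eq (array : List Int) (h : array ≠ []) :
    is_complete_cycle_counting_alt array =
      (decide (pvT array h = array.length) && decide (pvTraj array (pvT array h) = 0)) := by
  have h0 : pvWalk array (array.length + 1) 0 PySem.Set.empty =
      (pvTraj array (pvT array h), pvVis array (pvT array h)) := by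
    have := pvWalk_stop array h (array.length + 1) 0 (Nat.zero_le _)
      (by have := pvT_le array h; omega)
    simpa [pvTraj, pvVis, PySem.Set.empty] using this
  simp only [is_complete_cycle_counting_alt, h0]
  congr 1
  · -- Set.len (pvVis T) = n ↔ T = n
    have hlen : PySem.Set.len (pvVis array (pvT array h)) = ((pvT array h : Nat) : Int) := by
      simp [PySem.Set.len, pvVis]
    rw [hlen]
    simp only [decide_eq_decide]
    exact_mod_cast Int.natCast_inj

-- characterization of A's fold
lemma pvA_fold (array : List Int) (m : Nat) :
    ((∃ k, 0 < k ∧ k ≤ m ∧ pvTraj array k = 0) ∧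
      (List.range m).foldl
        (fun (st : Option Int) (_ : Nat) =>
          match st with
          | none => none
          | some ci => let ci' := pvStep array ci; if ci' = 0 then none else some ci')
        (some 0) = none) ∨
    ((∀ k, 0 < k → k ≤ m → pvTraj array k ≠ 0) ∧
      (List.range m).foldl
        (fun (st : Option Int) (_ : Nat) =>
          match st with
          | none => none
          | some ci => let ci' := pvStep array ci; if ci' = 0 then none else some ci')
        (some 0) = some (pvTraj array m)) := by
  induction m with
  | zero =>
    right
    constructor
    · intro k hk1 hk2; omega
    · rfl
  | succ m ih =>
    rw [List.range_succ, List.foldl_append]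
    rcases ih with ⟨⟨k, hk1, hk2, hk3⟩, hnone⟩ | ⟨hall, hsome⟩
    · left
      refine ⟨⟨k, hk1, by omega, hk3⟩, ?_⟩
      rw [hnone]; rfl
    · rw [hsome]
      by_cases h0 : pvStep array (pvTraj array m) = 0
      · left
        refine ⟨⟨m+1, by omega, le_refl _, h0⟩, ?_⟩
        simp [h0]
      · right
        constructor
        · intro k hk1 hk2
          rcases Nat.lt_or_ge k (m+1) with hlt | hge
          · exact hall k hk1 (by omega)
          · have : k = m + 1 := by omega
            subst this; exact h0
        · simp [h0]; rfl

lemma pvA_eq_true_iff (array : List Int) (h : array ≠ []) :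
    is_complete_cycle_counting array = true ↔
      (∀ k, 0 < k → k < array.length → pvTraj array k ≠ 0) ∧
        pvTraj array (array.length) = 0 := by
  have hn : 0 < array.length := List.length_pos_iff.mpr h
  unfold is_complete_cycle_counting
  rcases pvA_fold array (array.length - 1) with ⟨⟨k, hk1, hk2, hk3⟩, hnone⟩ | ⟨hall, hsome⟩
  · rw [hnone]
    simp only [Bool.false_eq_true, false_iff]
    rintro ⟨hallk, _⟩
    exact hallk k hk1 (by omega) hk3
  · rw [hsome]
    simp only [decide_eq_true_eq]
    have hstep : pvStep array (pvTraj array (array.length - 1)) = pvTraj array (array.length) := by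
      have : array.length - 1 + 1 = array.length := by omega
      conv_rhs => rw [← this]
      rfl
    rw [hstep]
    constructor
    · intro hlast
      refine ⟨?_, hlast⟩
      intro k hk1 hk2
      exact hall k hk1 (by omega)
    · rintro ⟨_, hlast⟩; exact hlast

-- A true implies the first n indices are pairwise distinct
lemma pvNodup_of_A (array : List Int) (_h : array ≠ [])
    (hall : ∀ k, 0 < k → k < array.length → pvTraj array k ≠ 0)
    (hn : pvTraj array (array.length) = 0) :
    ∀ i j, i < j → j < array.length → pvTraj array i ≠ pvTraj array j := by
  intro i j hij hj hEq
  set n := array.length with hnn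
  have hshift := pvTraj_shift array hEq (n - j)
  have h1 : j + (n - j) = n := by omega
  have h2 : pvTraj array (i + (n - j)) = 0 := by
    rw [hshift, h1, hn]
  rcases Nat.eq_zero_or_pos (i + (n - j)) with h3 | h3
  · omega
  · exact hall (i + (n - j)) h3 (by omega) h2

lemma pvMain (array : List Int) (h : array ≠ []) :
    is_complete_cycle_counting array = is_complete_cycle_counting_alt array := by
  rw [pvAlt_eq array h]
  set n := array.length with hnn
  have hn : 0 < n := List.length_pos_iff.mpr h
  rw [Bool.eq_iff_iff, pvA_eq_true_iff array h]
  simp only [Bool.and_eq_true, decide_eq_true_eq]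
  constructor
  · rintro ⟨hall, h0⟩
    have hnd : ∀ i j, i < j → j < n → pvTraj array i ≠ pvTraj array j :=
      pvNodup_of_A array h hall h0
    have hTle : pvT array h ≤ n := pvT_le array h
    have hTn : pvT array h = n := by
      by_contra hne
      have hTlt : pvT array h < n := by omega
      rcases (pvVis_mem array _ _).mp (pvT_spec array h) with ⟨i, hi, hEq⟩
      exact hnd i (pvT array h) hi hTlt hEq
    exact ⟨hTn, by rw [hTn]; exact h0⟩
  · rintro ⟨hTn, h0⟩
    rw [hTn] at h0
    refine ⟨?_, h0⟩
    intro k hk1 hk2 hkz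
    have : pvTraj array k ∈ pvVis array k := by
      rw [pvVis_mem]
      exact ⟨0, hk1, by rw [hkz]; rfl⟩
    exact pvT_min array h (by omega) this

-- ===== VERDICT (by name: the statement is the Claim_ definition above) =====
theorem is_complete_cycle_counting_spec : Claim_equal_is_complete_cycle_counting := by
  intro array _ hpre
  unfold Spec_is_complete_cycle_counting
  exact pvMain array hpre
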